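-- pv_equiv track=rewrite | github.com/Diego-Bonora/Ejercicios | Programacion 1 2022/practico 4 P2/ejercicio18.py | SumaFechasIguales
-- ===== SOURCE A (Python) =====
-- def bisiesto(año):
--      return año % 4 == 0 and año % 100 != 0 or año % 400 == 0
--
-- def verificar(año):
--      if bisiesto(año) == False:
--         diasMes = [0, 31, 28, 31, 30, 31, 30, 31, 31, 30, 31, 30, 31]
--         return diasMes
--      else:
--         diasMes = [0, 31, 29, 31, 30, 31, 30, 31, 31, 30, 31, 30, 31]
--         return diasMes
--
-- def SumaFechasIguales(mayor,menor):
--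
--     diasMes = verificar(menor[0])
--     total=0
--     i = menor[1]
--
--     total=diasMes[i] - menor[2]
--     menor[2] = 0
--     i+= 1
--
--     if i < mayor[1]:
--         while i < mayor[1]:
--             total+=diasMes[i]
--             i+= 1
--         total+= mayor[2] - menor[2]
--         return total
--
--     else:
--         total+= mayor[2] - menor[2]
--         return total
-- ===== SOURCE B (Python) =====
-- def bisiesto(año):
--     return año % 4 == 0 and año % 100 != 0 or año % 400 == 0
--
-- def SumaFechasIguales(mayor, menor):
--     # prefix-sum table instead of the month loop; mirrors A's menor[2]=0 mutation
--     feb = 29 if bisiesto(menor[0]) else 28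
--     diasMes = [0, 31, feb, 31, 30, 31, 30, 31, 31, 30, 31, 30, 31]
--     cum = [0]
--     s = 0
--     for x in diasMes:
--         s += x
--         cum.append(s)
--     d_lo = menor[2]
--     menor[2] = 0
--     if mayor[1] - menor[1] >= 2:
--         return cum[mayor[1]] - cum[menor[1]] - d_lo + mayor[2]
--     return diasMes[menor[1]] - d_lo + mayor[2]
-- ===== Notes on version B (the rewrite author's own statement) =====
-- stated objective: alternative
-- what changed: B replaces A's month-by-month while loop with a prefix-sum table of cumulative month lengths built once, so the between-months total is obtained by two table lookups (cum[mayor[1]] - cum[menor[1]]) instead of iterating over the months.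
-- outside the precondition, e.g. on SumaFechasIguales([2021, 1, 5], [2021, -2, 3]): A returns 63, B returns -332
import Mathlib
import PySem

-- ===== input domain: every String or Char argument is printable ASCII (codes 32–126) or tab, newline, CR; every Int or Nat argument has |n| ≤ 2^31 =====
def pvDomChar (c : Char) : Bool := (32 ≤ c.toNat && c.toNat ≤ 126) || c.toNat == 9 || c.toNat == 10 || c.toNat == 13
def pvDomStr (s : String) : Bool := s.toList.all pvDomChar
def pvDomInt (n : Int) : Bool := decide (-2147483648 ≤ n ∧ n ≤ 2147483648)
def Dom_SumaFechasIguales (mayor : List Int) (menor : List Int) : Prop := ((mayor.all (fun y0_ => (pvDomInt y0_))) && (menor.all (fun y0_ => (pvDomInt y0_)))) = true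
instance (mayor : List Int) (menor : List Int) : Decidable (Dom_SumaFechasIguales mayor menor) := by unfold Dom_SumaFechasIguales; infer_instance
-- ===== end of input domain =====

-- B replaces A's month-by-month while loop with a prefix-sum table and two lookups;
-- both A and B mutate menor[2] := 0 in Python (return value is unaffected by this side effect).

-- ===== PORT A =====
def bisiesto (a : Int) : Bool :=
  (PySem.Int.mod a 4 == 0 && !(PySem.Int.mod a 100 == 0)) || PySem.Int.mod a 400 == 0

def verificar (a : Int) : List Int :=
  if bisiesto a == false then [0, 31, 28, 31, 30, 31, 30, 31, 31, 30, 31, 30, 31]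
  else [0, 31, 29, 31, 30, 31, 30, 31, 31, 30, 31, 30, 31]

def SumaFechasIguales (mayor : List Int) (menor : List Int) : Int :=
  let diasMes := verificar (PySem.List.pyGetD menor 0 0)
  let i := PySem.List.pyGetD menor 1 0
  let total := PySem.List.pyGetD diasMes i 0 - PySem.List.pyGetD menor 2 0
  let menor := menor.set 2 0          -- menor[2] = 0 (index in range on Pre_)
  let i := i + 1
  if i < PySem.List.pyGetD mayor 1 0 then
    -- while i < mayor[1]: total += diasMes[i]; i += 1
    let total := (PySem.List.pyRange i (PySem.List.pyGetD mayor 1 0) 1).foldl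
                   (fun t j => t + PySem.List.pyGetD diasMes j 0) total
    total + (PySem.List.pyGetD mayor 2 0 - PySem.List.pyGetD menor 2 0)
  else
    total + (PySem.List.pyGetD mayor 2 0 - PySem.List.pyGetD menor 2 0)

-- ===== PORT B =====
def SumaFechasIguales_alt (mayor : List Int) (menor : List Int) : Int :=
  let feb : Int := if bisiesto (PySem.List.pyGetD menor 0 0) then 29 else 28
  let diasMes : List Int := [0, 31, feb, 31, 30, 31, 30, 31, 31, 30, 31, 30, 31]
  -- cum = [0]; s = 0; for x in diasMes: s += x; cum.append(s)
  let cum := (diasMes.foldl (fun (p : List Int × Int) x => (p.1 ++ [p.2 + x], p.2 + x)) ([0], 0)).1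
  let dlo := PySem.List.pyGetD menor 2 0
  let menor := menor.set 2 0          -- menor[2] = 0, as in Source B
  if PySem.List.pyGetD mayor 1 0 - PySem.List.pyGetD menor 1 0 ≥ 2 then
    PySem.List.pyGetD cum (PySem.List.pyGetD mayor 1 0) 0
      - PySem.List.pyGetD cum (PySem.List.pyGetD menor 1 0) 0
      - dlo + PySem.List.pyGetD mayor 2 0
  else
    PySem.List.pyGetD diasMes (PySem.List.pyGetD menor 1 0) 0 - dlo + PySem.List.pyGetD mayor 2 0

-- ===== PRECONDITION & SPEC =====
-- Pre_ restricts to the natural date domain: both lists carry [year, month, day] (length ≥ 3),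
-- menor's month is an actual month index 0..12 and mayor's month is ≤ 12+1, exactly what keeps
-- A free of IndexError; it additionally excludes negative menor months -13..-1, where A still
-- returns a value only by Python's accidental negative-index wraparound into the month table.
def Pre_SumaFechasIguales (mayor : List Int) (menor : List Int) : Prop :=
  3 ≤ mayor.length ∧ 3 ≤ menor.length ∧
  0 ≤ menor.getD 1 0 ∧ menor.getD 1 0 ≤ 12 ∧ mayor.getD 1 0 ≤ 13

instance (mayor : List Int) (menor : List Int) : Decidable (Pre_SumaFechasIguales mayor menor) := by
  unfold Pre_SumaFechasIguales; infer_instance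

def pvWitness_SumaFechasIguales : List Int × List Int := ([2021, 3, 5], [2021, 1, 10])

def Spec_SumaFechasIguales (mayor : List Int) (menor : List Int) (out : Int) : Prop := out = SumaFechasIguales_alt mayor menor
instance (mayor : List Int) (menor : List Int) (out : Int) : Decidable (Spec_SumaFechasIguales mayor menor out) := by unfold Spec_SumaFechasIguales; infer_instance

-- ===== CLAIM (what is proved, stated in full; the proofs are below) =====
def Claim_equal_SumaFechasIguales : Prop := ∀ (mayor : List Int) (menor : List Int), Dom_SumaFechasIguales mayor menor → Pre_SumaFechasIguales mayor menor → Spec_SumaFechasIguales mayor menor (SumaFechasIguales mayor menor)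


-- ===== LEMMAS AND PROOFS =====

-- month-range sums of the two month tables agree with differences of B's prefix-sum table (checked by decide)
theorem key28 : ∀ m ∈ PySem.List.pyRange 0 13 1, ∀ M ∈ PySem.List.pyRange (m+2) 14 1,
    ((PySem.List.pyRange (m+1) M 1).map
        (fun j => PySem.List.pyGetD [(0:Int), 31, 28, 31, 30, 31, 30, 31, 31, 30, 31, 30, 31] j 0)).sum
      = PySem.List.pyGetD [(0:Int),0,31,59,90,120,151,181,212,243,273,304,334,365] M 0
        - PySem.List.pyGetD [(0:Int),0,31,59,90,120,151,181,212,243,273,304,334,365] m 0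
        - PySem.List.pyGetD [(0:Int), 31, 28, 31, 30, 31, 30, 31, 31, 30, 31, 30, 31] m 0 := by decide

theorem key29 : ∀ m ∈ PySem.List.pyRange 0 13 1, ∀ M ∈ PySem.List.pyRange (m+2) 14 1,
    ((PySem.List.pyRange (m+1) M 1).map
        (fun j => PySem.List.pyGetD [(0:Int), 31, 29, 31, 30, 31, 30, 31, 31, 30, 31, 30, 31] j 0)).sum
      = PySem.List.pyGetD [(0:Int),0,31,60,91,121,152,182,213,244,274,305,335,366] M 0
        - PySem.List.pyGetD [(0:Int),0,31,60,91,121,152,182,213,244,274,305,335,366] m 0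
        - PySem.List.pyGetD [(0:Int), 31, 29, 31, 30, 31, 30, 31, 31, 30, 31, 30, 31] m 0 := by decide

set_option maxHeartbeats 1000000 in
theorem suma_eq (Y M dh : Int) (mr : List Int) (y m dl : Int) (lr : List Int)
    (hm0 : 0 ≤ m) (hm12 : m ≤ 12) (hM13 : M ≤ 13) :
    SumaFechasIguales (Y :: M :: dh :: mr) (y :: m :: dl :: lr)
      = SumaFechasIguales_alt (Y :: M :: dh :: mr) (y :: m :: dl :: lr) := by
  have hset : (y :: m :: dl :: lr).set 2 0 = y :: m :: (0:Int) :: lr := rfl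
  cases hb : bisiesto y
  case false =>
    simp only [SumaFechasIguales, SumaFechasIguales_alt, hset]
    simp only [pysem, verificar, hb, List.getD_cons_succ, List.getD_cons_zero, List.foldl,
      Bool.false_eq_true, beq_self_eq_true, if_true]
    norm_num
    by_cases hM : m + 2 ≤ M
    · rw [if_pos (by omega), if_pos (by omega)]
      rw [key28 m (by rw [PySem.List.mem_pyRange_one]; omega)
            M (by rw [PySem.List.mem_pyRange_one]; omega)]
      ring
    · rw [if_neg (by omega), if_neg (by omega)]
  case true =>
    simp only [SumaFechasIguales, SumaFechasIguales_alt, hset]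
    simp only [pysem, verificar, hb, List.getD_cons_succ, List.getD_cons_zero, List.foldl,
      if_true]
    norm_num
    by_cases hM : m + 2 ≤ M
    · rw [if_pos (by omega), if_pos (by omega)]
      rw [key29 m (by rw [PySem.List.mem_pyRange_one]; omega)
            M (by rw [PySem.List.mem_pyRange_one]; omega)]
      ring
    · rw [if_neg (by omega), if_neg (by omega)]

-- ===== VERDICT (by name: the statement is the Claim_ definition above) =====
theorem SumaFechasIguales_spec : Claim_equal_SumaFechasIguales := by
  intro mayor menor _ hpre
  obtain ⟨hma, hme, hm0, hm12, hM13⟩ := hpre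
  match mayor, menor with
  | Y :: M :: dh :: mr, y :: m :: dl :: lr =>
    simp only [List.getD, List.getElem?_cons_succ, List.getElem?_cons_zero, Option.getD_some] at hm0 hm12 hM13
    exact suma_eq Y M dh mr y m dl lr hm0 hm12 hM13
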